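/-
  THE MODEL OF jsmn NEVER LEAVES ITS TOKEN ARRAY, part 1: the functions jsmn_parse calls.
  How the invariant of the token array (`TokInv`, Json/Jsmn/Inv.lean) behaves under the writes jsmn makes (`TokInv.set`, `TokInv.set_same`,
  `TokInv.upd`, `TokInv.setSuper`), and that jsmn_init, jsmn_alloc_token, jsmn_parse_primitive, jsmn_parse_string and
  `tokens[toksuper].size++` keep `Inv`: `init_inv`, `alloc_inv`, `prim_inv`, `str_inv`, `bump_inv`. For all four configurations.
  Part 2 (jsmn_parse itself, and `safeFacts`) is Json/Jsmn/Safe.lean.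
-/
import Json.Jsmn.Lemmas

namespace Jsmn

/-! ### the invariant of the token array under the writes jsmn makes -/

/-- `TokInv` looks only at `toknext` and `toksuper` of the parser. -/
theorem TokInv.congr {cfg : Config} {p p' : Parser} {ts : Tokens} {n : Nat} (h : TokInv cfg p ts n)
    (h1 : p'.toknext = p.toknext) (h2 : p'.toksuper = p.toksuper) : TokInv cfg p' ts n := by
  obtain ⟨a, b, c, d, e, f⟩ := h
  exact ⟨a, b, by omega, by omega, by rw [h1, h2]; exact e, by rw [h1]; exact f⟩

/-- Writing token `j` keeps `TokInv` if the new token's parent link is -1 or points below `j` (only asked with parent links). -/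
theorem TokInv.set {cfg : Config} {p : Parser} {ts : Tokens} {n : Nat} (h : TokInv cfg p ts n) (j : Nat) (t : Token)
    (ht : cfg.parentLinks = true → -1 ≤ t.parent ∧ t.parent < j) : TokInv cfg p (ts.set j t) n := by
  obtain ⟨a, b, c, d, e, f⟩ := h
  refine ⟨by rw [length_set]; exact a, b, c, d, e, fun hpl i hi => ?_⟩
  rw [getD_set]
  split
  · rename_i hij; rw [← hij.1]; exact ht hpl
  · exact f hpl i hi

/-- Writing token `j` keeps `TokInv` if the parent link of token `j` is not changed. -/
theorem TokInv.set_same {cfg : Config} {p : Parser} {ts : Tokens} {n : Nat} (h : TokInv cfg p ts n) (j : Nat) (t : Token)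
    (ht : t.parent = (ts.getD j default).parent) : TokInv cfg p (ts.set j t) n := by
  obtain ⟨a, b, c, d, e, f⟩ := h
  refine ⟨by rw [length_set]; exact a, b, c, d, e, fun hpl i hi => ?_⟩
  rw [getD_set]
  split
  · rename_i hij; rw [ht, hij.1]; exact f hpl i hi
  · exact f hpl i hi

/-- An update `tokens[i] = f (tokens[i])` that does not touch the parent link keeps `TokInv` (whatever the index). -/
theorem TokInv.upd {cfg : Config} {p : Parser} {ts : Tokens} {n : Nat} (h : TokInv cfg p ts n) (i : Int) (f : Token → Token)
    (hf : ∀ t, (f t).parent = t.parent) : TokInv cfg p (tokUpd ts i f) n := by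
  unfold tokUpd
  split
  · exact h
  · rename_i hi
    rw [tokAt_nonneg (by omega)]
    exact h.set_same _ _ (hf _)

/-- A new `toksuper` that is -1 or the index of an allocated token keeps `TokInv`. -/
theorem TokInv.setSuper {cfg : Config} {p : Parser} {ts : Tokens} {n : Nat} (h : TokInv cfg p ts n) (k : Int)
    (h1 : -1 ≤ k) (h2 : k < p.toknext) : TokInv cfg { p with toksuper := k } ts n := by
  obtain ⟨a, b, c, d, e, f⟩ := h
  refine ⟨a, b, c, h1, ?_, f⟩
  show k < if cfg.parentLinks = true then (p.toknext : Int) else (n : Int)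
  split <;> omega

/-- With tokens, `Inv` is `TokInv` plus the range of `pos` (the other ranges follow). -/
theorem Inv.ofTok {cfg : Config} {p : Parser} {ts : Tokens} {n : Nat} (h : TokInv cfg p ts n) (hpos : p.pos < 4294967296) :
    Inv cfg p (some ts) n := by
  have ⟨a, b, c, d, e, f⟩ := h
  refine ⟨hpos, by omega, ⟨by omega, ?_⟩, by omega, fun ts' hts => by cases hts; exact h⟩
  have : p.toksuper < (n : Int) := by
    have := e; split at this <;> omega
  omega

/-- The token part of `Inv`. -/
theorem Inv.tok {cfg : Config} {p : Parser} {ts : Tokens} {n : Nat} (h : Inv cfg p (some ts) n) : TokInv cfg p ts n := h.toks ts rfl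

/-- In counting mode `Inv` is only the ranges of the parser's fields. -/
theorem Inv.counting {cfg : Config} {p : Parser} {n : Nat} (hpos : p.pos < 4294967296) (htn : p.toknext < 4294967296)
    (hs : -2147483648 ≤ p.toksuper ∧ p.toksuper < 2147483648) (hn : n < 4294967296) : Inv cfg p none n :=
  ⟨hpos, htn, hs, hn, fun _ h => by cases h⟩

/-- `Inv` does not care about `pos`, as long as it is an `unsigned int`. -/
theorem Inv.setPos {cfg : Config} {p : Parser} {toks : Option Tokens} {n : Nat} (h : Inv cfg p toks n) (q : Nat) (hq : q < 4294967296) :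
    Inv cfg { p with pos := q } toks n :=
  ⟨hq, h.toknextR, h.superR, h.numR, fun ts hts => (h.toks ts hts).congr rfl rfl⟩

/-! ### jsmn_init, jsmn_alloc_token -/

/-- jsmn_init establishes the invariant. -/
theorem init_inv (cfg : Config) (toks : Option Tokens) (n : Nat) (h : Inv.Init toks n) : Inv cfg Parser.init toks n := by
  refine ⟨by decide, by decide, by decide, h.1, fun ts hts => ?_⟩
  have ⟨h1, h2⟩ := h.2 ts hts
  refine ⟨h1, h2, Nat.zero_le _, by decide, ?_, fun _ i hi => absurd hi (Nat.not_lt_zero i)⟩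
  show (-1 : Int) < if cfg.parentLinks = true then ((0 : Nat) : Int) else (n : Int)
  split <;> omega

/-- jsmn_alloc_token, on the token array: the fresh token is `tokens[toknext]`, inside the array; `TokInv` is kept; the fresh token's
parent link is -1 with parent links. -/
theorem alloc_tok {cfg : Config} {p p' : Parser} {ts ts' : Tokens} {n i : Nat} (h : TokInv cfg p ts n)
    (ha : allocToken cfg p ts n = some (i, p', ts')) :
    i = p.toknext ∧ i < n ∧ p'.toknext = i + 1 ∧ p'.pos = p.pos ∧ p'.toksuper = p.toksuper ∧ TokInv cfg p' ts' n ∧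
      ts'.length = n := by
  unfold allocToken at ha
  split at ha
  · cases ha
  · rename_i hlt
    simp only [Option.some.injEq, Prod.mk.injEq] at ha
    obtain ⟨rfl, rfl, rfl⟩ := ha
    have hsm := h.small
    have hu : u32 ((p.toknext : Int) + 1) = p.toknext + 1 := u32_succ (by omega)
    refine ⟨rfl, by omega, hu, rfl, rfl, ?_, by rw [length_set]; exact h.len⟩
    have h1 : TokInv cfg p (ts.set p.toknext
        { ts.getD p.toknext default with start := -1, «end» := -1, size := 0,
                                          parent := if cfg.parentLinks then -1 else (ts.getD p.toknext default).parent }) n := by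
      apply h.set
      intro hpl; simp only [hpl, if_true]; omega
    obtain ⟨a, b, c, d, e, f⟩ := h1
    refine ⟨a, b, by simp only [hu]; omega, d, ?_, ?_⟩
    · simp only [hu]
      have := e
      split at this
      · rw [if_pos (by assumption)]; omega
      · rw [if_neg (by assumption)]; exact this
    · intro hpl j hj
      simp only [hu] at hj
      by_cases hjt : j = p.toknext
      · subst hjt
        rw [getD_set_eq _ (by rw [h.len]; omega)]
        simp only [hpl, if_true]; omega
      · exact f hpl j (by omega)

/-- **jsmn_alloc_token** keeps the invariant; the fresh token is `tokens[toknext]`, inside the array. -/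
theorem alloc_inv (cfg : Config) (p : Parser) (ts : Tokens) (n i : Nat) (p' : Parser) (ts' : Tokens)
    (h : Inv cfg p (some ts) n) (ha : allocToken cfg p ts n = some (i, p', ts')) :
    i = p.toknext ∧ i < n ∧ p'.toknext = i + 1 ∧ p'.pos = p.pos ∧ p'.toksuper = p.toksuper ∧ Inv cfg p' (some ts') n := by
  have ⟨a, b, c, d, e, f, _⟩ := alloc_tok h.tok ha
  exact ⟨a, b, c, d, e, Inv.ofTok f (by rw [d]; exact h.pos)⟩

/-- What jsmn_parse_primitive and jsmn_parse_string do with a found token: allocate, fill (the parent link is not touched by the fill),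
set the parent link to `toksuper` with parent links. This keeps `TokInv`. -/
theorem fill_tok {cfg : Config} {p p' : Parser} {ts ts' : Tokens} {n i : Nat} (h : TokInv cfg p ts n)
    (ha : allocToken cfg p ts n = some (i, p', ts')) (type : Nat) (a b : Int) :
    TokInv cfg p'
      (if cfg.parentLinks then
        (ts'.set i (fillToken (ts'.getD i default) type a b)).set i
          { (ts'.set i (fillToken (ts'.getD i default) type a b)).getD i default with parent := p.toksuper }
       else ts'.set i (fillToken (ts'.getD i default) type a b)) n := by
  have ⟨hi, hin, htn, hpos, hsup, hT, hlen⟩ := alloc_tok h ha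
  have h1 : TokInv cfg p' (ts'.set i (fillToken (ts'.getD i default) type a b)) n := hT.set_same _ _ rfl
  split
  · rename_i hpl
    apply h1.set
    intro _
    have := h.superHi
    rw [if_pos hpl] at this
    exact ⟨h.superLo, by simp only; omega⟩
  · exact h1

/-! ### jsmn_parse_primitive -/

/-- The part of jsmn_parse_primitive after the label `found:`, with the scan having stopped at `q`. -/
def primFound (cfg : Config) (p : Parser) (toks : Option Tokens) (numTokens : Nat) (q : Nat) : Int × Parser × Option Tokens :=
  match toks with
  | none => (0, { p with pos := u32 (q - 1) }, none)
  | some ts =>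
    match allocToken cfg { p with pos := q } ts numTokens with
    | none => (JSMN_ERROR_NOMEM, { p with pos := p.pos }, some ts)
    | some (i, p', ts') =>
      let ts' := ts'.set i (fillToken (ts'.getD i default) JSMN_PRIMITIVE (i32 p.pos) (i32 q))
      let ts' := if cfg.parentLinks then ts'.set i { ts'.getD i default with parent := p.toksuper } else ts'
      (0, { p' with pos := u32 (q - 1) }, some ts')

/-- jsmn_parse_primitive is: scan, then fail or go to `found:`. -/
theorem parsePrimitive_eq (cfg : Config) (js : List UInt8) (fuel : Nat) (p : Parser) (toks : Option Tokens) (n : Nat) :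
    parsePrimitive cfg js fuel p toks n =
      match primScan cfg js fuel p.pos with
      | none => none
      | some .bad => some (JSMN_ERROR_INVAL, { p with pos := p.pos }, toks)
      | some (.eoi q) => if cfg.strict then some (JSMN_ERROR_PART, { p with pos := p.pos }, toks) else some (primFound cfg p toks n q)
      | some (.found q) => some (primFound cfg p toks n q) := rfl

/-- The `found:` part keeps the invariant and `toksuper`, and answers 0 or JSMN_ERROR_NOMEM. -/
theorem primFound_inv {cfg : Config} {p : Parser} {toks : Option Tokens} {n : Nat} (q : Nat) (h : Inv cfg p toks n) :
    Inv cfg (primFound cfg p toks n q).2.1 (primFound cfg p toks n q).2.2 n ∧ (primFound cfg p toks n q).2.1.toksuper = p.toksuper ∧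
      ((primFound cfg p toks n q).1 = 0 ∨ (primFound cfg p toks n q).1 = JSMN_ERROR_NOMEM) ∧
      ((primFound cfg p toks n q).2.2 = none ↔ toks = none) := by
  unfold primFound
  cases toks with
  | none => exact ⟨h.setPos _ (u32_lt _), rfl, Or.inl rfl, Iff.rfl⟩
  | some ts =>
    simp only
    cases ha : allocToken cfg { p with pos := q } ts n with
    | none => exact ⟨h, rfl, Or.inr rfl, by simp⟩
    | some x =>
      obtain ⟨i, p', ts'⟩ := x
      have hT : TokInv cfg { p with pos := q } ts n := h.tok.congr rfl rfl
      have ⟨hi, hin, htn, hpos, hsup, hT', hlen⟩ := alloc_tok hT ha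
      have hf := fill_tok hT ha JSMN_PRIMITIVE (i32 p.pos) (i32 q)
      refine ⟨?_, hsup, Or.inl rfl, by simp⟩
      exact Inv.ofTok (hf.congr rfl rfl) (u32_lt _)

/-- **jsmn_parse_primitive** keeps the invariant and `toksuper`, and returns 0 or an error code. -/
theorem prim_inv (cfg : Config) (js : List UInt8) (fuel : Nat) (p : Parser) (toks : Option Tokens) (n : Nat) (r : Int) (p' : Parser)
    (toks' : Option Tokens) (h : Inv cfg p toks n) (hp : parsePrimitive cfg js fuel p toks n = some (r, p', toks')) :
    Inv cfg p' toks' n ∧ p'.toksuper = p.toksuper ∧ IsSubResult r ∧ (toks' = none ↔ toks = none) := by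
  rw [parsePrimitive_eq] at hp
  have hf := fun q => primFound_inv (cfg := cfg) q h
  split at hp
  · cases hp
  · cases hp; exact ⟨h, rfl, Or.inr (Or.inr (Or.inl rfl)), Iff.rfl⟩
  · split at hp
    · cases hp; exact ⟨h, rfl, Or.inr (Or.inr (Or.inr rfl)), Iff.rfl⟩
    · rename_i q _ _
      have ⟨a, b, c, d⟩ := hf q
      simp only [Option.some.injEq] at hp
      rw [hp] at a b c d
      exact ⟨a, b, c.elim Or.inl (fun x => Or.inr (Or.inl x)), d⟩
  · rename_i q _
    have ⟨a, b, c, d⟩ := hf q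
    simp only [Option.some.injEq] at hp
    rw [hp] at a b c d
    exact ⟨a, b, c.elim Or.inl (fun x => Or.inr (Or.inl x)), d⟩

/-! ### jsmn_parse_string -/

/-- The position at which the scan of jsmn_parse_string finds the closing quote is an `unsigned int`. -/
theorem strScan_quote_lt {js : List UInt8} {fuel pos q : Nat} (hpos : pos < 4294967296)
    (h : strScan js fuel pos = some (.quote q)) : q < 4294967296 := by
  induction fuel generalizing pos with
  | zero => simp [strScan] at h
  | succ f ih =>
    rw [strScan] at h
    simp only [] at h
    repeat' split at h
    all_goals first | (simp at h; done) | (simp at h; omega) | exact ih (u32_lt _) h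

/-- **jsmn_parse_string** keeps the invariant and `toksuper`, and returns 0 or an error code. -/
theorem str_inv (cfg : Config) (js : List UInt8) (fuel : Nat) (p : Parser) (toks : Option Tokens) (n : Nat) (r : Int) (p' : Parser)
    (toks' : Option Tokens) (h : Inv cfg p toks n) (hp : parseString cfg js fuel p toks n = some (r, p', toks')) :
    Inv cfg p' toks' n ∧ p'.toksuper = p.toksuper ∧ IsSubResult r ∧ (toks' = none ↔ toks = none) := by
  unfold parseString at hp
  simp only at hp
  split at hp
  · cases hp
  · cases hp; exact ⟨h, rfl, Or.inr (Or.inr (Or.inl rfl)), Iff.rfl⟩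
  · cases hp; exact ⟨h, rfl, Or.inr (Or.inr (Or.inr rfl)), Iff.rfl⟩
  · rename_i q hq
    have hq32 : q < 4294967296 := strScan_quote_lt (u32_lt _) hq
    cases toks with
    | none =>
      simp only [Option.some.injEq, Prod.mk.injEq] at hp
      obtain ⟨rfl, rfl, rfl⟩ := hp
      exact ⟨h.setPos _ hq32, rfl, Or.inl rfl, Iff.rfl⟩
    | some ts =>
      simp only at hp
      cases ha : allocToken cfg { p with pos := q } ts n with
      | none =>
        rw [ha] at hp
        simp only [Option.some.injEq, Prod.mk.injEq] at hp
        obtain ⟨rfl, rfl, rfl⟩ := hp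
        exact ⟨h, rfl, Or.inr (Or.inl rfl), by simp⟩
      | some x =>
        obtain ⟨i, p1, ts1⟩ := x
        rw [ha] at hp
        simp only [Option.some.injEq, Prod.mk.injEq] at hp
        obtain ⟨rfl, rfl, rfl⟩ := hp
        have hT : TokInv cfg { p with pos := q } ts n := h.tok.congr rfl rfl
        have ⟨hi, hin, htn, hpos, hsup, hT', hlen⟩ := alloc_tok hT ha
        have hf := fill_tok hT ha JSMN_STRING (i32 (i32 p.pos + 1)) (i32 q)
        exact ⟨Inv.ofTok hf (by rw [hpos]; exact hq32), hsup, Or.inl rfl, by simp⟩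

/-! ### `tokens[toksuper].size++` -/

/-- **`tokens[toksuper].size++`** keeps the invariant. -/
theorem bump_inv (cfg : Config) (p : Parser) (toks : Option Tokens) (n : Nat) (h : Inv cfg p toks n) : Inv cfg p (bumpSuper p toks) n := by
  cases toks with
  | none => exact h
  | some ts =>
    unfold bumpSuper
    simp only
    split
    · exact Inv.ofTok (h.tok.upd _ _ (fun _ => rfl)) h.pos
    · exact h

/-- `bumpSuper` keeps counting mode counting mode. -/
theorem bumpSuper_none_iff (p : Parser) (toks : Option Tokens) : bumpSuper p toks = none ↔ toks = none := by
  cases toks with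
  | none => simp [bumpSuper]
  | some ts => unfold bumpSuper; simp only; split <;> simp

end Jsmn
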